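-- pv_equiv track=rewrite | github.com/EpowerxAI/ViteosModel | Lombard 249 code for gompu - final copy.py | get_first_non_null_value
-- ===== SOURCE A (Python) =====
-- def get_first_non_null_value(string_of_values_separated_by_comma):
--     if(string_of_values_separated_by_comma != '' and string_of_values_separated_by_comma != 'nan' and string_of_values_separated_by_comma != 'None' ):
--         if(string_of_values_separated_by_comma.partition(',')[0] != '' and string_of_values_separated_by_comma.partition(',')[0] != 'nan' and string_of_values_separated_by_comma.partition(',')[0] != 'None'):
--             return(string_of_values_separated_by_comma.partition(',')[0])
--         else:
--             return(get_first_non_null_value(string_of_values_separated_by_comma.partition(',')[2]))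
--     else:
--         return('Blank value')
-- ===== SOURCE B (Python) =====
-- def get_first_non_null_value(string_of_values_separated_by_comma):
--     for token in string_of_values_separated_by_comma.split(','):
--         if token not in ('', 'nan', 'None'):
--             return token
--     return 'Blank value'
-- ===== Notes on version B (the rewrite author's own statement) =====
-- stated objective: simpler
-- what changed: Replaced A's recursion over partition(',') suffixes (with a redundant whole-suffix null check at each level) by a single iterative pass over split(',') that returns the first token not in {'', 'nan', 'None'} and falls through to 'Blank value'.
import Mathlib
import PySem

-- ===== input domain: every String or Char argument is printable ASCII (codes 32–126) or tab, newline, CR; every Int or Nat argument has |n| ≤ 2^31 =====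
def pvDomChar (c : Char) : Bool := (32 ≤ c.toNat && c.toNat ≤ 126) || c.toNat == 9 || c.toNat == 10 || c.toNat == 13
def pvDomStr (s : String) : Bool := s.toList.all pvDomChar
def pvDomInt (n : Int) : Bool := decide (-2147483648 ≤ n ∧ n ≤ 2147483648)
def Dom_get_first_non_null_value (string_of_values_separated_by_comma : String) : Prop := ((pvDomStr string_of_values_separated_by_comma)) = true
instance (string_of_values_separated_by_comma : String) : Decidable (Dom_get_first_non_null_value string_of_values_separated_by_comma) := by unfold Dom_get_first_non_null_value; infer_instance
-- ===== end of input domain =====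

-- B replaces A's recursion over partition(',') suffixes by one iterative pass over split(','); same return value, objective: simpler.

-- ===== PORT A =====
-- the three null sentinels A compares against ('', 'nan', 'None'), on char lists
def pvIsNull (cs : List Char) : Bool :=
  cs == [] || cs == ['n', 'a', 'n'] || cs == ['N', 'o', 'n', 'e']

-- s.partition(',')[0] and s.partition(',')[2] (empty when there is no comma), on char lists
def pvPart0 (cs : List Char) : List Char := cs.takeWhile (· ≠ ',')
def pvPart2 (cs : List Char) : List Char := (cs.dropWhile (· ≠ ',')).tail

-- used by the port's decreasing_by (must precede it)
theorem pvPart2_lt (cs : List Char) (h : ',' ∈ cs) : (pvPart2 cs).length < cs.length := by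
  unfold pvPart2
  have hne : cs.dropWhile (· ≠ ',') ≠ [] := by
    intro he
    have := List.dropWhile_eq_nil_iff.mp he
    simp at this
    exact (this ',' h) rfl
  have h1 : (cs.dropWhile (· ≠ ',')).length ≤ cs.length := List.length_dropWhile_le _ _
  have h2 : ((cs.dropWhile (· ≠ ',')).tail).length < (cs.dropWhile (· ≠ ',')).length := by
    cases hd : cs.dropWhile (· ≠ ',') with
    | nil => exact absurd hd hne
    | cons a t => simp
  omega

-- used by the port's decreasing_by: if the first partition piece is a null sentinel
-- but the whole string is not, the string must contain a comma
theorem pvComma_mem (cs : List Char) (h1 : pvIsNull cs = false) (h2 : pvIsNull (pvPart0 cs) = true) :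
    ',' ∈ cs := by
  by_contra hmem
  have : cs.takeWhile (· ≠ ',') = cs := by
    apply List.takeWhile_eq_self_iff.mpr
    intro x hx
    simp
    intro he; subst he; exact hmem hx
  rw [pvPart0, this] at h2
  rw [h2] at h1
  exact absurd h1 (by simp)

def pvGoA (cs : List Char) : List Char :=
  if h1 : pvIsNull cs = false then
    if h2 : pvIsNull (pvPart0 cs) = false then pvPart0 cs
    else pvGoA (pvPart2 cs)
  else ['B', 'l', 'a', 'n', 'k', ' ', 'v', 'a', 'l', 'u', 'e']
termination_by cs.length
decreasing_by exact pvPart2_lt cs (pvComma_mem cs h1 (by simpa using h2))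

def get_first_non_null_value (string_of_values_separated_by_comma : String) : String :=
  String.ofList (pvGoA string_of_values_separated_by_comma.toList)

-- ===== PORT B =====
def get_first_non_null_value_alt (string_of_values_separated_by_comma : String) : String :=
  match (PySem.Chars.splitOn string_of_values_separated_by_comma.toList [',']).find?
      (fun t => !(t == [] || t == ['n', 'a', 'n'] || t == ['N', 'o', 'n', 'e'])) with
  | some t => String.ofList t
  | none => "Blank value"

-- ===== PRECONDITION & SPEC =====
def Spec_get_first_non_null_value (string_of_values_separated_by_comma : String) (out : String) : Prop := out = get_first_non_null_value_alt string_of_values_separated_by_comma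
instance (string_of_values_separated_by_comma : String) (out : String) : Decidable (Spec_get_first_non_null_value string_of_values_separated_by_comma out) := by unfold Spec_get_first_non_null_value; infer_instance

-- ===== CLAIM (what is proved, stated in full; the proofs are below) =====
def Claim_equal_get_first_non_null_value : Prop := ∀ (string_of_values_separated_by_comma : String), Dom_get_first_non_null_value string_of_values_separated_by_comma → Spec_get_first_non_null_value string_of_values_separated_by_comma (get_first_non_null_value string_of_values_separated_by_comma)

-- ===== LEMMAS AND PROOFS =====

-- split(',') written as structural recursion on 'first piece / rest', to bridge the two ports
def pvSplit (cs : List Char) : List (List Char) :=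
  pvPart0 cs :: (if h : ',' ∈ cs then pvSplit (pvPart2 cs) else [])
termination_by cs.length
decreasing_by exact pvPart2_lt cs h

theorem pvSplit_eq (cs : List Char) :
    pvSplit cs = pvPart0 cs :: (if ',' ∈ cs then pvSplit (pvPart2 cs) else []) := by
  rw [pvSplit]; split <;> simp_all

theorem pvGo_eq (fuel : Nat) (l cur : List Char) (acc : List (List Char)) (h : l.length < fuel) :
    PySem.Chars.splitOn.go [','] fuel l cur acc
      = acc.reverse ++ (cur.reverse ++ pvPart0 l) :: (if ',' ∈ l then pvSplit (pvPart2 l) else []) := by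
  induction fuel generalizing l cur acc with
  | zero => omega
  | succ n ih =>
    cases l with
    | nil => simp [PySem.Chars.splitOn.go, pvPart0]
    | cons c rest =>
      by_cases hc : c = ','
      · subst hc
        rw [PySem.Chars.splitOn.go]
        have hp : [','].isPrefixOf (',' :: rest) = true := by simp [List.isPrefixOf]
        rw [if_pos hp]
        have hd : List.drop [','].length (',' :: rest) = rest := rfl
        rw [hd]
        rw [ih rest [] (cur.reverse :: acc) (by simpa using Nat.lt_of_succ_lt_succ h)]
        simp only [List.reverse_nil, List.nil_append, List.reverse_cons]
        rw [← pvSplit_eq rest]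
        have hp0 : pvPart0 (',' :: rest) = [] := by simp [pvPart0]
        have hp2 : pvPart2 (',' :: rest) = rest := by simp [pvPart2]
        simp [hp0, hp2]
      · rw [PySem.Chars.splitOn.go]
        have hp : [','].isPrefixOf (c :: rest) = false := by
          simp [List.isPrefixOf]
          intro he; exact absurd he.symm hc
        rw [if_neg (by simp [hp])]
        rw [ih rest (c :: cur) acc (by simpa using Nat.lt_of_succ_lt_succ h)]
        have hcm : ¬ (',' = c) := fun he => hc he.symm
        have hp0 : pvPart0 (c :: rest) = c :: pvPart0 rest := by
          simp [pvPart0, hc]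
        have hp2 : pvPart2 (c :: rest) = pvPart2 rest := by
          simp [pvPart2, hc]
        simp [hp0, hp2, hcm]

theorem pvSplitOn_eq (cs : List Char) : PySem.Chars.splitOn cs [','] = pvSplit cs := by
  unfold PySem.Chars.splitOn
  rw [pvGo_eq (cs.length + 1) cs [] [] (by omega), pvSplit_eq cs]
  simp

-- null sentinels contain no comma
theorem pvNull_no_comma (cs : List Char) (h : pvIsNull cs = true) : ',' ∉ cs := by
  unfold pvIsNull at h
  simp at h
  rcases h with (h | h) | h <;> subst h <;> decide

-- B's search predicate is the negation of pvIsNull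
theorem pvPred_eq (t : List Char) :
    (!(t == [] || t == ['n', 'a', 'n'] || t == ['N', 'o', 'n', 'e'])) = !pvIsNull t := by
  simp [pvIsNull]

-- the heart: A's recursion computes B's find?-over-split, by strong induction on length
theorem pvGoA_eq_find (n : Nat) : ∀ (cs : List Char), cs.length ≤ n →
    String.ofList (pvGoA cs)
      = (match (pvSplit cs).find? (fun t => !pvIsNull t) with
         | some t => String.ofList t
         | none => "Blank value") := by
  induction n with
  | zero =>
    intro cs hlen
    have : cs = [] := by cases cs <;> simp_all
    subst this
    rw [pvGoA, pvSplit_eq]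
    decide
  | succ n ih =>
    intro cs hlen
    rw [pvGoA, pvSplit_eq]
    by_cases h1 : pvIsNull cs = false
    · rw [dif_pos h1]
      by_cases h2 : pvIsNull (pvPart0 cs) = false
      · rw [dif_pos h2]
        simp [List.find?, h2]
      · rw [dif_neg h2]
        have h2' : pvIsNull (pvPart0 cs) = true := by simpa using h2
        have hmem : ',' ∈ cs := pvComma_mem cs h1 h2'
        rw [if_pos hmem]
        have hlt : (pvPart2 cs).length ≤ n := by
          have := pvPart2_lt cs hmem; omega
        rw [ih (pvPart2 cs) hlt, pvSplit_eq]
        simp [List.find?, h2']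
    · rw [dif_neg h1]
      have h1' : pvIsNull cs = true := by simpa using h1
      have hmem : ',' ∉ cs := pvNull_no_comma cs h1'
      rw [if_neg hmem]
      have hp0 : pvPart0 cs = cs := by
        apply List.takeWhile_eq_self_iff.mpr
        intro x hx
        simp
        intro he; subst he; exact hmem hx
      simp [List.find?, hp0, h1']

-- ===== VERDICT (by name: the statement is the Claim_ definition above) =====
theorem get_first_non_null_value_spec : Claim_equal_get_first_non_null_value := by
  intro s _
  unfold Spec_get_first_non_null_value get_first_non_null_value get_first_non_null_value_alt
  rw [pvSplitOn_eq]
  have := pvGoA_eq_find s.toList.length s.toList (le_refl _)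
  simp only [pvPred_eq]
  exact this
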